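-- pv_equiv track=rewrite | github.com/lennysunrealx/UnrealTools | Plugins/QuickWidgetTools/Content/Python/get_outputFolder.py | _find_key_anywhere
-- ===== SOURCE A (Python) =====
-- def _find_key_anywhere(text, key):
--     prefix = f"{key}="
--     lines = text.splitlines()
--     matches = []
--
--     current_section = "<no section yet>"
--     for i, line in enumerate(lines):
--         stripped = line.strip()
--
--         if stripped.startswith("[") and stripped.endswith("]"):
--             current_section = stripped
--             continue
--
--         if stripped.startswith(prefix):
--             matches.append((i + 1, current_section, stripped))
--
--     return matches
-- ===== SOURCE B (Python) =====
-- def _find_key_anywhere(text, key):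
--     prefix = key + "="
--     stripped = [ln.strip() for ln in text.splitlines()]
--     # index table: (line_index, header_text) for every section-header line
--     headers = [(i, s) for i, s in enumerate(stripped) if s.startswith("[") and s.endswith("]")]
--     idxs = [i for i, _ in headers]
--     matches = []
--     for i, s in enumerate(stripped):
--         if s.startswith("[") and s.endswith("]"):
--             continue
--         if s.startswith(prefix):
--             # binary search: lo = number of header lines before line i
--             lo, hi = 0, len(idxs)
--             while lo < hi:
--                 mid = (lo + hi) // 2
--                 if idxs[mid] < i:
--                     lo = mid + 1
--                 else:
--                     hi = mid
--             section = headers[lo - 1][1] if lo > 0 else "<no section yet>"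
--             matches.append((i + 1, section, s))
--     return matches
-- ===== Notes on version B (the rewrite author's own statement) =====
-- stated objective: alternative
-- what changed: Replaces the running current_section accumulator with a precomputed index table of section headers plus a per-match binary search for the most recent preceding header.
import Mathlib
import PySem

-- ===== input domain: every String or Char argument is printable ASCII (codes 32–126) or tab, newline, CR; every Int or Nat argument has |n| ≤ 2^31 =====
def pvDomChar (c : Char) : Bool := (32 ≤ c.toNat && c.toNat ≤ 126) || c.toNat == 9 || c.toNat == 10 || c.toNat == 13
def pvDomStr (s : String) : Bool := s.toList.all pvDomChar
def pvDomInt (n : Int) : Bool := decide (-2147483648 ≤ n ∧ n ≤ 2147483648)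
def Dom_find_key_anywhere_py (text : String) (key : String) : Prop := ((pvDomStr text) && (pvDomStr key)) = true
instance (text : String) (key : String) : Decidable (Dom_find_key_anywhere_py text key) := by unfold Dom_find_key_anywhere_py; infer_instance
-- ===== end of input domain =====

-- B replaces A's running current_section accumulator by a precomputed header index table
-- consulted by binary search per match (an alternative decomposition; return value only).

-- ===== PORT A =====
def find_key_anywhere_py (text : String) (key : String) : List (Int × String × String) :=
  let pre := key ++ "="
  let lines := PySem.Str.splitlines text
  ((PySem.List.enumerate lines 0).foldl
    (fun (st : String × List (Int × String × String)) p =>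
      let stripped := PySem.Str.strip p.2
      if PySem.Str.startswith stripped "[" && PySem.Str.endswith stripped "]" then
        (stripped, st.2)
      else if PySem.Str.startswith stripped pre then
        (st.1, st.2 ++ [(p.1 + 1, st.1, stripped)])
      else st)
    ("<no section yet>", [])).2

-- ===== PORT B =====
-- hand-written lower-bound binary search from Source B (idxs[mid] is in range whenever probed,
-- so the 0 default of getD is never the value compared)
def fkaLower (idxs : List Int) (i : Int) (lo hi : Nat) : Nat :=
  if _h : lo < hi then
    let mid := (lo + hi) / 2
    if idxs.getD mid 0 < i then fkaLower idxs i (mid + 1) hi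
    else fkaLower idxs i lo mid
  else lo
termination_by hi - lo
decreasing_by all_goals omega

def find_key_anywhere_py_alt (text : String) (key : String) : List (Int × String × String) :=
  let pre := key ++ "="
  let stripped := (PySem.Str.splitlines text).map PySem.Str.strip
  let headers := (PySem.List.enumerate stripped 0).filter
      (fun p => PySem.Str.startswith p.2 "[" && PySem.Str.endswith p.2 "]")
  let idxs := headers.map (·.1)
  (PySem.List.enumerate stripped 0).foldl
    (fun acc p =>
      if PySem.Str.startswith p.2 "[" && PySem.Str.endswith p.2 "]" then acc
      else if PySem.Str.startswith p.2 pre then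
        let lo := fkaLower idxs p.1 0 idxs.length
        let sec := if 0 < lo then (headers.getD (lo - 1) (0, "")).2 else "<no section yet>"
        acc ++ [(p.1 + 1, sec, p.2)]
      else acc) []

-- ===== PRECONDITION & SPEC =====
def Spec_find_key_anywhere_py (text : String) (key : String) (out : List (Int × String × String)) : Prop := out = find_key_anywhere_py_alt text key
instance (text : String) (key : String) (out : List (Int × String × String)) : Decidable (Spec_find_key_anywhere_py text key out) := by unfold Spec_find_key_anywhere_py; infer_instance

-- ===== CLAIM (what is proved, stated in full; the proofs are below) =====
def Claim_equal_find_key_anywhere_py : Prop := ∀ (text : String) (key : String), Dom_find_key_anywhere_py text key → Spec_find_key_anywhere_py text key (find_key_anywhere_py text key)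

-- ===== LEMMAS AND PROOFS =====

-- generic setting: ss is the stripped line list, hdr the header test, mat the prefix test
def fkaStep (hdr mat : String → Bool) (st : String × List (Int × String × String)) (q : Int × String) :
    String × List (Int × String × String) :=
  if hdr q.2 then (q.2, st.2)
  else if mat q.2 then (st.1, st.2 ++ [(q.1 + 1, st.1, q.2)])
  else st

def fkaHeaders (hdr : String → Bool) (ss : List String) : List (Int × String) :=
  (PySem.List.enumerate ss 0).filter (fun p => hdr p.2)

def fkaSec (hdr : String → Bool) (ss : List String) (i : Int) : String :=
  match ((fkaHeaders hdr ss).filter (fun p => decide (p.1 < i))).getLast? with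
  | some p => p.2
  | none => "<no section yet>"

def fkaCur (hdr : String → Bool) (ss : List String) : String :=
  match (fkaHeaders hdr ss).getLast? with
  | some p => p.2
  | none => "<no section yet>"

def fkaEmit (hdr mat : String → Bool) (ss : List String) (q : Int × String) :
    List (Int × String × String) :=
  if hdr q.2 then [] else if mat q.2 then [(q.1 + 1, fkaSec hdr ss q.1, q.2)] else []

-- A's strip-inside-the-loop fold equals the fold over the pre-stripped list
lemma fka_foldl_enumerate_map {α β σ : Type} (f : σ → Int × β → σ) (g : α → β)
    (xs : List α) (s : Int) (init : σ) :
    (PySem.List.enumerate xs s).foldl (fun st p => f st (p.1, g p.2)) init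
      = (PySem.List.enumerate (xs.map g) s).foldl f init := by
  induction xs generalizing s init with
  | nil => simp [PySem.List.enumerate_nil]
  | cons x t ih => simp [PySem.List.enumerate_cons, ih]

lemma fkaHeaders_append (hdr : String → Bool) (ss : List String) (s : String) :
    fkaHeaders hdr (ss ++ [s])
      = fkaHeaders hdr ss ++ (if hdr s then [((ss.length : Int), s)] else []) := by
  unfold fkaHeaders
  rw [PySem.List.enumerate_append, List.filter_append]
  simp [PySem.List.enumerate_cons, PySem.List.enumerate_nil, List.filter_cons]

lemma fkaHeaders_mem_bound (hdr : String → Bool) (ss : List String) (p : Int × String)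
    (hp : p ∈ fkaHeaders hdr ss) : 0 ≤ p.1 ∧ p.1 < (ss.length : Int) := by
  have hmem : p ∈ PySem.List.enumerate ss 0 := (List.mem_filter.mp hp).1
  obtain ⟨k, hk, rfl⟩ := (PySem.List.mem_enumerate_iff ss 0 p).mp hmem
  refine ⟨by simp, by simp; omega⟩

lemma fkaSec_append (hdr : String → Bool) (ss : List String) (s : String) (i : Int)
    (hi : i ≤ (ss.length : Int)) : fkaSec hdr (ss ++ [s]) i = fkaSec hdr ss i := by
  unfold fkaSec
  rw [fkaHeaders_append, List.filter_append]
  have : ((if hdr s then [((ss.length : Int), s)] else []).filter (fun p => decide (p.1 < i))) = [] := by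
    split
    · simp; omega
    · simp
  rw [this, List.append_nil]

lemma fkaSec_ge (hdr : String → Bool) (ss : List String) (i : Int)
    (hi : (ss.length : Int) ≤ i) : fkaSec hdr ss i = fkaCur hdr ss := by
  unfold fkaSec fkaCur
  rw [List.filter_eq_self.mpr]
  intro p hp
  have := fkaHeaders_mem_bound hdr ss p hp
  simp; omega

-- characterisation of A's loop: final section + emitted matches
lemma fkaA_char (hdr mat : String → Bool) (ss : List String) :
    (PySem.List.enumerate ss 0).foldl (fkaStep hdr mat) ("<no section yet>", [])
      = (fkaCur hdr ss, (PySem.List.enumerate ss 0).flatMap (fkaEmit hdr mat ss)) := by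
  induction ss using List.reverseRecOn with
  | nil => simp [PySem.List.enumerate_nil, fkaCur, fkaHeaders]
  | append_singleton ss s ih =>
    rw [PySem.List.enumerate_append, List.foldl_append, ih,
      PySem.List.enumerate_cons, PySem.List.enumerate_nil, List.flatMap_append]
    have hemit : ∀ q ∈ PySem.List.enumerate ss 0,
        fkaEmit hdr mat (ss ++ [s]) q = fkaEmit hdr mat ss q := by
      intro q hq
      obtain ⟨k, hk, rfl⟩ := (PySem.List.mem_enumerate_iff ss 0 q).mp hq
      unfold fkaEmit
      rw [fkaSec_append hdr ss s _ (by simp; omega)]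
    rw [List.flatMap_congr hemit]
    have hcur : fkaCur hdr (ss ++ [s]) = if hdr s then s else fkaCur hdr ss := by
      unfold fkaCur
      rw [fkaHeaders_append]
      by_cases h : hdr s
      · simp [h]
      · simp [h]
    have hsec : fkaSec hdr (ss ++ [s]) ((ss.length : Int)) = fkaCur hdr ss := by
      rw [fkaSec_append hdr ss s _ (by omega), fkaSec_ge hdr ss _ (by omega)]
    simp only [List.foldl_cons, List.foldl_nil, List.flatMap_cons, List.flatMap_nil]
    unfold fkaStep fkaEmit
    by_cases h1 : hdr s <;> by_cases h2 : mat s <;> simp [h1, h2, hcur, hsec]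

-- lower-bound binary search: with a ≤-sorted idxs it separates the < i entries
lemma fkaLower_spec (idxs : List Int) (i : Int)
    (hsort : ∀ m n, m < n → n < idxs.length → idxs.getD m 0 ≤ idxs.getD n 0) :
    ∀ lo hi, lo ≤ hi → hi ≤ idxs.length →
    (∀ m, m < lo → idxs.getD m 0 < i) →
    (∀ m, hi ≤ m → m < idxs.length → ¬ idxs.getD m 0 < i) →
    fkaLower idxs i lo hi ≤ idxs.length ∧
      (∀ m, m < fkaLower idxs i lo hi → idxs.getD m 0 < i) ∧
      (∀ m, fkaLower idxs i lo hi ≤ m → m < idxs.length → ¬ idxs.getD m 0 < i) := by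
  have hsort' : ∀ m n, m ≤ n → n < idxs.length → idxs.getD m 0 ≤ idxs.getD n 0 := by
    intro m n hmn hn
    rcases Nat.eq_or_lt_of_le hmn with rfl | h
    · exact le_refl _
    · exact hsort m n h hn
  have main : ∀ fuel lo hi, hi - lo ≤ fuel → lo ≤ hi → hi ≤ idxs.length →
      (∀ m, m < lo → idxs.getD m 0 < i) →
      (∀ m, hi ≤ m → m < idxs.length → ¬ idxs.getD m 0 < i) →
      fkaLower idxs i lo hi ≤ idxs.length ∧
        (∀ m, m < fkaLower idxs i lo hi → idxs.getD m 0 < i) ∧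
        (∀ m, fkaLower idxs i lo hi ≤ m → m < idxs.length → ¬ idxs.getD m 0 < i) := by
    intro fuel
    induction fuel with
    | zero =>
      intro lo hi hf hle hlen hlo hhi
      have heq : lo = hi := by omega
      rw [fkaLower, dif_neg (by omega)]
      exact ⟨by omega, hlo, fun m hm hmlen => hhi m (by omega) hmlen⟩
    | succ n ihn =>
      intro lo hi hf hle hlen hlo hhi
      rw [fkaLower]
      by_cases hlh : lo < hi
      · rw [dif_pos hlh]
        simp only []
        by_cases hcmp : idxs.getD ((lo + hi) / 2) 0 < i
        · rw [if_pos hcmp]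
          refine ihn ((lo + hi) / 2 + 1) hi (by omega) (by omega) hlen ?_ hhi
          intro m hm
          rcases Nat.lt_or_ge m lo with h | h
          · exact hlo m h
          · calc idxs.getD m 0 ≤ idxs.getD ((lo + hi) / 2) 0 :=
                  hsort' m _ (by omega) (by omega)
              _ < i := hcmp
        · rw [if_neg hcmp]
          refine ihn lo ((lo + hi) / 2) (by omega) (by omega) (by omega) hlo ?_
          intro m hm hmlen hmi
          exact hcmp (lt_of_le_of_lt (hsort' _ m hm hmlen) hmi)
      · rw [dif_neg hlh]
        have heq : lo = hi := by omega
        exact ⟨by omega, hlo, fun m hm hmlen => hhi m (by omega) hmlen⟩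
  exact fun lo hi hle hlen hlo hhi =>
    main (hi - lo) lo hi (le_refl _) hle hlen hlo hhi

lemma fka_filter_eq_take {α : Type} (l : List α) (p : α → Bool) (r : Nat)
    (hr : r ≤ l.length)
    (h1 : ∀ m (hm : m < l.length), m < r → p l[m] = true)
    (h2 : ∀ m (hm : m < l.length), r ≤ m → p l[m] = false) :
    l.filter p = l.take r := by
  induction l generalizing r with
  | nil => simp
  | cons a t ih =>
    cases r with
    | zero =>
      simp only [List.take_zero]
      refine List.filter_eq_nil_iff.mpr ?_
      intro x hx
      obtain ⟨n, hn, rfl⟩ := List.mem_iff_getElem.mp hx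
      simp [h2 n hn (Nat.zero_le n)]
    | succ r =>
      have pa : p a = true := h1 0 (by simp) (by omega)
      simp only [List.filter_cons, pa, if_pos, List.take_succ_cons]
      congr 1
      refine ih r (by simpa using hr) ?_ ?_
      · intro m hm hmr
        have := h1 (m + 1) (by simp; omega) (by omega)
        simpa using this
      · intro m hm hmr
        have := h2 (m + 1) (by simp; omega) (by omega)
        simpa using this

-- the per-match lookup of B computes fkaSec
lemma fkaLookup_eq_sec (hdr : String → Bool) (ss : List String) (i : Int) :
    (if 0 < fkaLower ((fkaHeaders hdr ss).map (·.1)) i 0 ((fkaHeaders hdr ss).map (·.1)).length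
     then ((fkaHeaders hdr ss).getD
        (fkaLower ((fkaHeaders hdr ss).map (·.1)) i 0 ((fkaHeaders hdr ss).map (·.1)).length - 1)
        (0, "")).2
     else "<no section yet>")
      = fkaSec hdr ss i := by
  set hs := fkaHeaders hdr ss with hhs
  set idxs := hs.map (·.1) with hidxs
  have hlen : idxs.length = hs.length := by simp [hidxs]
  have hpair : hs.Pairwise (fun p q => p.1 < q.1) := by
    rw [hhs]; exact (PySem.List.pairwise_lt_enumerate ss 0).filter _
  have hval : ∀ m (hm : m < hs.length), idxs.getD m 0 = (hs[m]'hm).1 := by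
    intro m hm
    rw [List.getD_eq_getElem _ _ (by omega : m < idxs.length)]
    simp [hidxs]
  have hsort : ∀ m n, m < n → n < idxs.length → idxs.getD m 0 ≤ idxs.getD n 0 := by
    intro m n hmn hn
    rw [hval m (by omega), hval n (by omega)]
    exact le_of_lt (List.pairwise_iff_getElem.mp hpair m n (by omega) (by omega) hmn)
  obtain ⟨hr1, hr2, hr3⟩ :=
    fkaLower_spec idxs i hsort 0 idxs.length (Nat.zero_le _) (le_refl _)
      (by intro m hm; omega) (by intro m h1 h2; omega)
  set r := fkaLower idxs i 0 idxs.length with hrdef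
  have hfilter : hs.filter (fun p => decide (p.1 < i)) = hs.take r := by
    apply fka_filter_eq_take hs _ r (by omega)
    · intro m hm hmr
      have := hr2 m hmr
      rw [hval m hm] at this
      simpa using this
    · intro m hm hmr
      have := hr3 m hmr (by omega)
      rw [hval m hm] at this
      simpa using this
  unfold fkaSec
  rw [← hhs, hfilter]
  by_cases hpos : 0 < r
  · rw [if_pos hpos]
    have htake : (hs.take r).getLast? = some (hs[r - 1]'(by omega)) := by
      rw [List.getLast?_eq_getElem?]
      have hl : (hs.take r).length = r := by simp; omega
      rw [hl, List.getElem?_take_of_lt (by omega), List.getElem?_eq_getElem (by omega)]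
    rw [htake, List.getD_eq_getElem _ _ (by omega : r - 1 < hs.length)]
  · rw [if_neg hpos]
    have hz : r = 0 := by omega
    rw [hz]
    simp

-- B's fold is the flatMap of fkaEmit
lemma fkaB_char (hdr mat : String → Bool) (ss : List String) :
    ((PySem.List.enumerate ss 0).foldl
      (fun acc q =>
        if hdr q.2 then acc
        else if mat q.2 then
          acc ++ [(q.1 + 1,
            (if 0 < fkaLower ((fkaHeaders hdr ss).map (·.1)) q.1 0 ((fkaHeaders hdr ss).map (·.1)).length
             then ((fkaHeaders hdr ss).getD
                (fkaLower ((fkaHeaders hdr ss).map (·.1)) q.1 0 ((fkaHeaders hdr ss).map (·.1)).length - 1)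
                (0, "")).2
             else "<no section yet>"), q.2)]
        else acc) [])
      = (PySem.List.enumerate ss 0).flatMap (fkaEmit hdr mat ss) := by
  have hstep : (fun (acc : List (Int × String × String)) (q : Int × String) =>
      if hdr q.2 then acc
      else if mat q.2 then
        acc ++ [(q.1 + 1,
          (if 0 < fkaLower ((fkaHeaders hdr ss).map (·.1)) q.1 0 ((fkaHeaders hdr ss).map (·.1)).length
           then ((fkaHeaders hdr ss).getD
              (fkaLower ((fkaHeaders hdr ss).map (·.1)) q.1 0 ((fkaHeaders hdr ss).map (·.1)).length - 1)
              (0, "")).2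
           else "<no section yet>"), q.2)]
      else acc) = fun acc q => acc ++ fkaEmit hdr mat ss q := by
    funext acc q
    by_cases h1 : hdr q.2
    · simp [fkaEmit, h1]
    · by_cases h2 : mat q.2
      · simp only [fkaEmit, h1, h2, Bool.false_eq_true, if_false, if_true]
        rw [fkaLookup_eq_sec hdr ss q.1]
      · simp [fkaEmit, h1, h2]
  rw [hstep, PySem.List.foldl_append_eq_flatMap]
  simp

-- ===== VERDICT (by name: the statement is the Claim_ definition above) =====
theorem find_key_anywhere_py_spec : Claim_equal_find_key_anywhere_py := by
  intro text key _
  unfold Spec_find_key_anywhere_py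
  have hA : find_key_anywhere_py text key
      = ((PySem.List.enumerate ((PySem.Str.splitlines text).map PySem.Str.strip) 0).foldl
          (fkaStep (fun s => PySem.Str.startswith s "[" && PySem.Str.endswith s "]")
            (fun s => PySem.Str.startswith s (key ++ "="))) ("<no section yet>", [])).2 := by
    unfold find_key_anywhere_py
    rw [← fka_foldl_enumerate_map
        (fkaStep (fun s => PySem.Str.startswith s "[" && PySem.Str.endswith s "]")
          (fun s => PySem.Str.startswith s (key ++ "="))) PySem.Str.strip
        (PySem.Str.splitlines text) 0 ("<no section yet>", ([] : List (Int × String × String)))]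
    rfl
  rw [hA, fkaA_char]
  exact (fkaB_char (fun s => PySem.Str.startswith s "[" && PySem.Str.endswith s "]")
    (fun s => PySem.Str.startswith s (key ++ "="))
    ((PySem.Str.splitlines text).map PySem.Str.strip)).symm
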